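-- pv_equiv track=rewrite | github.com/GiuseppeFrigeni/Montezuma_Internal_RL | play_internal_rl.py | compute_action_positions
-- ===== SOURCE A (Python) =====
-- def compute_action_positions(num_images: int, n_patches: int, seq_len: int, chunk: int = 8):
--     action_positions = []
--     cur = 0
--     for i in range(num_images):
--         cur += n_patches
--         start = i * chunk
--         end = min((i + 1) * chunk, seq_len)
--         if start < seq_len:
--             k = end - start
--             action_positions.extend([cur + j for j in range(k)])
--             cur += k
--     total_tokens = num_images * n_patches + seq_len
--     return action_positions, total_tokens
-- ===== SOURCE B (Python) =====
-- def compute_action_positions(num_images: int, n_patches: int, seq_len: int, chunk: int = 8):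
--     # Stateless: each image i sits at base offset i*(n_patches+chunk) + n_patches,
--     # since every earlier active image contributes exactly `chunk` action tokens.
--     action_positions = [
--         i * (n_patches + chunk) + n_patches + j
--         for i in range(num_images)
--         if i * chunk < seq_len
--         for j in range(min((i + 1) * chunk, seq_len) - i * chunk)
--     ]
--     return action_positions, num_images * n_patches + seq_len
-- ===== Notes on version B (the rewrite author's own statement) =====
-- stated objective: simpler
-- what changed: Replaces the running accumulator `cur` threaded through the loop with a stateless closed-form base offset i*(n_patches+chunk)+n_patches in a single flat comprehension (every earlier active image contributes exactly `chunk` action tokens), removing the per-iteration state updates and list.extend calls.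
import Mathlib
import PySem

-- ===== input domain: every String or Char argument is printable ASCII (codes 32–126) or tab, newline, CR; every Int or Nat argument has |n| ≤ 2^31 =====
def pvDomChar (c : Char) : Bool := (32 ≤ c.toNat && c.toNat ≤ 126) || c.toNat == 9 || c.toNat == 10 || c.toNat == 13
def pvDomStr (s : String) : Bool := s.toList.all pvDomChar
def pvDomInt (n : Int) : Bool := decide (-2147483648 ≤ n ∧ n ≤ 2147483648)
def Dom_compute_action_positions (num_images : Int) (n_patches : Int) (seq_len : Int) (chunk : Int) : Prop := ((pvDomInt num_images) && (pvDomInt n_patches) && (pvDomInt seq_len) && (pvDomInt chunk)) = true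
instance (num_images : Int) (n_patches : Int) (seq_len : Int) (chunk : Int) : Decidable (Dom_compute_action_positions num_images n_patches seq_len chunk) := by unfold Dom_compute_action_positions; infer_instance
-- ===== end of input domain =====

-- ===== PORT A =====
def compute_action_positions (num_images : Int) (n_patches : Int) (seq_len : Int) (chunk : Int) : List Int × Int :=
  let st := (PySem.List.pyRange 0 num_images 1).foldl
    (fun (st : List Int × Int) i =>
      let cur := st.2 + n_patches
      let start := i * chunk
      let stop := min ((i + 1) * chunk) seq_len
      if start < seq_len then
        let k := stop - start
        (st.1 ++ (PySem.List.pyRange 0 k 1).map (fun j => cur + j), cur + k)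
      else
        (st.1, cur)) ([], 0)
  (st.1, num_images * n_patches + seq_len)

-- ===== PORT B =====
-- B: stateless closed-form base offset per image, one flat comprehension (flatMap).
def compute_action_positions_alt (num_images : Int) (n_patches : Int) (seq_len : Int) (chunk : Int) : List Int × Int :=
  ((PySem.List.pyRange 0 num_images 1).flatMap (fun i =>
      if i * chunk < seq_len then
        (PySem.List.pyRange 0 (min ((i + 1) * chunk) seq_len - i * chunk) 1).map
          (fun j => i * (n_patches + chunk) + n_patches + j)
      else []),
   num_images * n_patches + seq_len)

-- ===== PRECONDITION & SPEC =====
def Spec_compute_action_positions (num_images : Int) (n_patches : Int) (seq_len : Int) (chunk : Int) (out : List Int × Int) : Prop := out = compute_action_positions_alt num_images n_patches seq_len chunk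
instance (num_images : Int) (n_patches : Int) (seq_len : Int) (chunk : Int) (out : List Int × Int) : Decidable (Spec_compute_action_positions num_images n_patches seq_len chunk out) := by unfold Spec_compute_action_positions; infer_instance

-- ===== CLAIM (what is proved, stated in full; the proofs are below) =====
def Claim_equal_compute_action_positions : Prop := ∀ (num_images : Int) (n_patches : Int) (seq_len : Int) (chunk : Int), Dom_compute_action_positions num_images n_patches seq_len chunk → Spec_compute_action_positions num_images n_patches seq_len chunk (compute_action_positions num_images n_patches seq_len chunk)

-- ===== LEMMAS AND PROOFS =====

-- ===== VERDICT (by name: the statement is the Claim_ definition above) =====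

-- A's fold step, named for the lemmas below
def stepA (n_patches : Int) (seq_len : Int) (chunk : Int) (st : List Int × Int) (i : Int) : List Int × Int :=
  let cur := st.2 + n_patches
  let start := i * chunk
  let stop := min ((i + 1) * chunk) seq_len
  if start < seq_len then
    let k := stop - start
    (st.1 ++ (PySem.List.pyRange 0 k 1).map (fun j => cur + j), cur + k)
  else
    (st.1, cur)

-- B's per-image block
def blockB (n_patches : Int) (seq_len : Int) (chunk : Int) (i : Int) : List Int :=
  if i * chunk < seq_len then
    (PySem.List.pyRange 0 (min ((i + 1) * chunk) seq_len - i * chunk) 1).map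
      (fun j => i * (n_patches + chunk) + n_patches + j)
  else []

theorem stepA_apply (n_patches seq_len chunk : Int) (st : List Int × Int) (i : Int) :
    stepA n_patches seq_len chunk st i =
      if i * chunk < seq_len then
        (st.1 ++ (PySem.List.pyRange 0 (min ((i + 1) * chunk) seq_len - i * chunk) 1).map
            (fun j => st.2 + n_patches + j),
         st.2 + n_patches + (min ((i + 1) * chunk) seq_len - i * chunk))
      else (st.1, st.2 + n_patches) := rfl

theorem blockB_apply (n_patches seq_len chunk : Int) (i : Int) :
    blockB n_patches seq_len chunk i =
      if i * chunk < seq_len then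
        (PySem.List.pyRange 0 (min ((i + 1) * chunk) seq_len - i * chunk) 1).map
          (fun j => i * (n_patches + chunk) + n_patches + j)
      else [] := rfl

-- fold invariant: after images 0..n-1, A's list is B's flatMap prefix, and (when chunk > 0)
-- A's accumulator `cur` has the closed form n*n_patches + max 0 (min (n*chunk) seq_len).
theorem inv_fold (n_patches seq_len chunk : Int) (n : Nat) :
    ((PySem.List.pyRange 0 (n:Int) 1).foldl (stepA n_patches seq_len chunk) ([], 0)).1 =
      (PySem.List.pyRange 0 (n:Int) 1).flatMap (blockB n_patches seq_len chunk) ∧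
    (0 < chunk →
      ((PySem.List.pyRange 0 (n:Int) 1).foldl (stepA n_patches seq_len chunk) ([], 0)).2 =
        (n:Int) * n_patches + max 0 (min ((n:Int) * chunk) seq_len)) := by
  induction n with
  | zero => simp
  | succ n ih =>
    obtain ⟨ih1, ih2⟩ := ih
    have h1 : (0:Int) ≤ (n:Int) := Int.natCast_nonneg n
    have hcast : ((n+1 : Nat) : Int) = (n:Int) + 1 := by push_cast; ring
    rw [hcast, PySem.List.pyRange_one_succ_right h1, List.foldl_append, List.flatMap_append,
      List.foldl_cons, List.foldl_nil, List.flatMap_cons, List.flatMap_nil, List.append_nil]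
    constructor
    · -- list component
      rw [stepA_apply, blockB_apply]
      by_cases hact : (n:Int) * chunk < seq_len
      · simp only [hact, if_pos]
        rw [ih1]
        by_cases hc : 0 < chunk
        · have hn0 : (0:Int) ≤ (n:Int) * chunk := by positivity
          have hmax : max 0 (min ((n:Int) * chunk) seq_len) = (n:Int) * chunk := by
            rw [min_eq_left (le_of_lt hact)]; exact max_eq_right hn0
          have hcur : ((PySem.List.pyRange 0 (n:Int) 1).foldl (stepA n_patches seq_len chunk) ([], 0)).2
              = (n:Int) * (n_patches + chunk) := by rw [ih2 hc, hmax]; ring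
          rw [hcur]
        · -- chunk ≤ 0: the appended range is empty on both sides
          rw [not_lt] at hc
          have hk : min (((n:Int)+1) * chunk) seq_len - (n:Int) * chunk ≤ 0 := by
            have : ((n:Int)+1) * chunk ≤ (n:Int) * chunk := by nlinarith
            have := min_le_left (((n:Int)+1) * chunk) seq_len
            linarith
          rw [PySem.List.pyRange_one_eq_nil hk]
          simp
      · simp [hact]
        rw [ih1]
    · -- accumulator component (only needed for chunk > 0)
      intro hc
      rw [stepA_apply]
      by_cases hact : (n:Int) * chunk < seq_len
      · simp only [hact, if_pos]
        have hn0 : (0:Int) ≤ (n:Int) * chunk := by positivity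
        have hmax : max 0 (min ((n:Int) * chunk) seq_len) = (n:Int) * chunk := by
          rw [min_eq_left (le_of_lt hact)]; exact max_eq_right hn0
        have hpos : (0:Int) ≤ min (((n:Int)+1) * chunk) seq_len := by
          rcases le_or_gt seq_len (((n:Int)+1) * chunk) with h | h
          · rw [min_eq_right h]; linarith
          · rw [min_eq_left (le_of_lt h)]; nlinarith
        rw [ih2 hc, hmax, max_eq_right hpos]; ring
      · simp only [hact, if_neg, not_false_iff]
        have hge : seq_len ≤ (n:Int) * chunk := le_of_not_gt hact
        have hge1 : seq_len ≤ ((n:Int)+1) * chunk := by nlinarith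
        rw [ih2 hc, min_eq_right hge, min_eq_right hge1]; ring

theorem compute_action_positions_spec : Claim_equal_compute_action_positions := by
  intro num_images n_patches seq_len chunk _
  unfold Spec_compute_action_positions compute_action_positions compute_action_positions_alt
  rcases le_or_gt num_images 0 with h | h
  · rw [PySem.List.pyRange_one_eq_nil h]
    simp
  · obtain ⟨n, rfl⟩ := Int.eq_ofNat_of_zero_le (le_of_lt h)
    have e := (inv_fold n_patches seq_len chunk n).1
    unfold stepA blockB at e
    simp only [Prod.mk.injEq]
    exact ⟨e, trivial⟩
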